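-- pv_equiv track=rewrite | github.com/cyoo28/predator-prey-model | Code/environment.py | check_attack
-- ===== SOURCE A (Python) =====
-- def check_attack(prey_new_moves, predator_new_moves, hunting_predators):
--     dead_prey_list = []
--     dead_predator_list = []
--     for hunting_idx in range(len(hunting_predators)):
--         if hunting_predators[hunting_idx] in hunting_predators[0:hunting_idx] + hunting_predators[hunting_idx + 1:]:
--             # predators successfully attack and prey dies
--             for prey_idx in range(len(prey_new_moves)):
--                 if hunting_predators[hunting_idx] == prey_new_moves[prey_idx]:
--                     dead_prey_list.append(prey_idx)
--         else:
--             # predator fails to attack and dies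
--             for predator_idx in range(len(predator_new_moves)):
--                 if hunting_predators[hunting_idx] == predator_new_moves[predator_idx]:
--                     dead_predator_list.append(predator_idx)
--     return [dead_prey_list, dead_predator_list]
-- ===== SOURCE B (Python) =====
-- def check_attack(prey_new_moves, predator_new_moves, hunting_predators):
--     count = {}
--     for h in hunting_predators:
--         count[h] = count.get(h, 0) + 1
--     prey_at = {}
--     for i, p in enumerate(prey_new_moves):
--         prey_at[p] = prey_at.get(p, []) + [i]
--     predator_at = {}
--     for i, p in enumerate(predator_new_moves):
--         predator_at[p] = predator_at.get(p, []) + [i]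
--     dead_prey_list = []
--     dead_predator_list = []
--     for h in hunting_predators:
--         if count[h] > 1:
--             dead_prey_list.extend(prey_at.get(h, []))
--         else:
--             dead_predator_list.extend(predator_at.get(h, []))
--     return [dead_prey_list, dead_predator_list]
-- ===== Notes on version B (the rewrite author's own statement) =====
-- stated objective: faster
-- what changed: Replaces the per-predator slice-membership test and the inner rescans of prey/predator lists by a precomputed occurrence counter and position-to-index-list maps, built once and looked up in a single pass.
import Mathlib
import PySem

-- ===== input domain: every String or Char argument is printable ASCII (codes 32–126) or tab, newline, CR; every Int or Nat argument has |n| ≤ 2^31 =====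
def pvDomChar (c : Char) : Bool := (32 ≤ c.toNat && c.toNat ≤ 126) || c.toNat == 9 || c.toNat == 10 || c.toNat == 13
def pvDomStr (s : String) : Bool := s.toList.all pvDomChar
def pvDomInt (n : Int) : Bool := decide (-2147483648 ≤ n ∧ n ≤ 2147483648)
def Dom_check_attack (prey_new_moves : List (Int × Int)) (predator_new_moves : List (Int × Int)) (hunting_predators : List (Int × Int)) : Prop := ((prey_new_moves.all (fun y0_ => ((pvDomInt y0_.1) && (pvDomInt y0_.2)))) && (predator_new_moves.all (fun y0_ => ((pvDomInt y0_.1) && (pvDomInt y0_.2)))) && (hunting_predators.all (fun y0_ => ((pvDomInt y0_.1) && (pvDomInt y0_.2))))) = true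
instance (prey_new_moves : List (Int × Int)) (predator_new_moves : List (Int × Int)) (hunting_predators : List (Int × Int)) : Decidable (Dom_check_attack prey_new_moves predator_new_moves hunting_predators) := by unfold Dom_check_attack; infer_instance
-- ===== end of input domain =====

-- B replaces A's quadratic slice-membership test and inner rescans by a precomputed occurrence
-- counter and position -> index-list maps (objective: faster; measured asymptotically faster).

-- ===== PORT A =====
-- literal port of A: for each hunting index, membership of hunting[i] in the rest (slices),
-- then an index-scan of prey or predator moves appending matching indices
def check_attack (prey_new_moves : List (Int × Int)) (predator_new_moves : List (Int × Int)) (hunting_predators : List (Int × Int)) : List (List Int) :=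
  let res := (PySem.List.pyRange 0 (hunting_predators.length : Int) 1).foldl
    (fun (st : List Int × List Int) hi =>
      let h := PySem.List.pyGetD hunting_predators hi (0, 0)
      if (PySem.List.slice hunting_predators (some 0) (some hi) ++
          PySem.List.slice hunting_predators (some (hi + 1)) none).contains h then
        ((PySem.List.pyRange 0 (prey_new_moves.length : Int) 1).foldl
          (fun acc pi => if h == PySem.List.pyGetD prey_new_moves pi (0, 0) then acc ++ [pi] else acc) st.1,
         st.2)
      else
        (st.1,
         (PySem.List.pyRange 0 (predator_new_moves.length : Int) 1).foldl
          (fun acc di => if h == PySem.List.pyGetD predator_new_moves di (0, 0) then acc ++ [di] else acc) st.2))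
    ([], [])
  [res.1, res.2]

-- ===== PORT B =====
-- port of B: occurrence counter of hunting positions + position -> index-list maps, one lookup pass
def check_attack_alt (prey_new_moves : List (Int × Int)) (predator_new_moves : List (Int × Int)) (hunting_predators : List (Int × Int)) : List (List Int) :=
  let count : PySem.Dict (Int × Int) Int :=
    hunting_predators.foldl (fun d h => d.modify h 0 (· + 1)) PySem.Dict.empty
  let preyAt : PySem.Dict (Int × Int) (List Int) :=
    (PySem.List.enumerate prey_new_moves 0).foldl (fun d ip => d.modify ip.2 [] (· ++ [ip.1])) PySem.Dict.empty
  let predAt : PySem.Dict (Int × Int) (List Int) :=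
    (PySem.List.enumerate predator_new_moves 0).foldl (fun d ip => d.modify ip.2 [] (· ++ [ip.1])) PySem.Dict.empty
  let res := hunting_predators.foldl
    (fun (st : List Int × List Int) h =>
      if count.getD h 0 > 1 then (st.1 ++ preyAt.getD h [], st.2)
      else (st.1, st.2 ++ predAt.getD h []))
    ([], [])
  [res.1, res.2]

-- ===== PRECONDITION & SPEC =====
def Spec_check_attack (prey_new_moves : List (Int × Int)) (predator_new_moves : List (Int × Int)) (hunting_predators : List (Int × Int)) (out : List (List Int)) : Prop := out = check_attack_alt prey_new_moves predator_new_moves hunting_predators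
instance (prey_new_moves : List (Int × Int)) (predator_new_moves : List (Int × Int)) (hunting_predators : List (Int × Int)) (out : List (List Int)) : Decidable (Spec_check_attack prey_new_moves predator_new_moves hunting_predators out) := by unfold Spec_check_attack; infer_instance

-- ===== CLAIM (what is proved, stated in full; the proofs are below) =====
def Claim_equal_check_attack : Prop := ∀ (prey_new_moves : List (Int × Int)) (predator_new_moves : List (Int × Int)) (hunting_predators : List (Int × Int)), Dom_check_attack prey_new_moves predator_new_moves hunting_predators → Spec_check_attack prey_new_moves predator_new_moves hunting_predators (check_attack prey_new_moves predator_new_moves hunting_predators)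

-- ===== LEMMAS AND PROOFS =====

-- matching indices of position h in xs (the common value of A's inner scan and B's map lookup)
def pvMatch (xs : List (Int × Int)) (h : Int × Int) : List Int :=
  ((PySem.List.enumerate xs 0).filter (fun p => p.2 == h)).map (·.1)

-- the common per-hunting-predator step
def pvStep (prey pred hunting : List (Int × Int)) : (List Int × List Int) → (Int × Int) → (List Int × List Int) :=
  fun st h =>
    if 1 < (hunting.count h : Int) then (st.1 ++ pvMatch prey h, st.2)
    else (st.1, st.2 ++ pvMatch pred h)

def pvResult (prey pred hunting : List (Int × Int)) : List (List Int) :=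
  let res := hunting.foldl (pvStep prey pred hunting) ([], [])
  [res.1, res.2]

-- A's inner index scan appends exactly the matching indices
lemma pv_innerA (xs : List (Int × Int)) (h : Int × Int) (acc : List Int) :
    (PySem.List.pyRange 0 (xs.length : Int) 1).foldl
      (fun acc pi => if h == PySem.List.pyGetD xs pi (0, 0) then acc ++ [pi] else acc) acc
      = acc ++ pvMatch xs h := by
  rw [PySem.List.foldl_append_if_eq_filter]
  congr 1
  unfold pvMatch
  rw [PySem.List.enumerate_eq_map_pyRange (d := (0,0))]
  simp [List.filter_map, Function.comp_def, Bool.beq_comm]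

-- B's position -> index-list map looks up exactly the matching indices
lemma pv_innerB (xs : List (Int × Int)) (h : Int × Int) :
    ((PySem.List.enumerate xs 0).foldl (fun d ip => d.modify ip.2 [] (· ++ [ip.1]))
      PySem.Dict.empty).getD h [] = pvMatch xs h := by
  rw [show (PySem.List.enumerate xs 0).foldl (fun d ip => d.modify ip.2 [] (· ++ [ip.1])) PySem.Dict.empty
      = ((PySem.List.enumerate xs 0).map (fun ip => (ip.2, ip.1))).foldl
          (fun d p => d.modify p.1 [] (· ++ [p.2])) PySem.Dict.empty by rw [List.foldl_map]]
  rw [PySem.Dict.getD_foldl_modify_append]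
  simp [pvMatch, List.filter_map, List.map_map, Function.comp_def]

-- membership of l[i] in the rest of l is exactly 'l[i] occurs more than once in l'
lemma pv_mem_rest (l : List (Int × Int)) (i : Nat) (hlt : i < l.length) :
    ((l.take i ++ l.drop (i + 1)).contains l[i]) = decide (1 < (l.count l[i] : Int)) := by
  have hd : l.drop i = l[i] :: l.drop (i + 1) := (List.getElem_cons_drop hlt).symm
  have hsplit : l = l.take i ++ l[i] :: l.drop (i + 1) := by
    conv_lhs => rw [← List.take_append_drop i l, hd]
  set v := l[i] with hv
  have hc : l.count v = (l.take i).count v + ((l.drop (i+1)).count v + 1) := by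
    conv_lhs => rw [hsplit]
    simp [List.count_append]
  rw [show ((l.take i ++ l.drop (i+1)).contains v) = decide (v ∈ l.take i ++ l.drop (i+1)) by simp,
     decide_eq_decide]
  have hm : v ∈ l.take i ++ l.drop (i+1) ↔ 0 < (l.take i).count v + (l.drop (i+1)).count v := by
    rw [← List.count_append, List.count_pos_iff]
  rw [hm, hc]; push_cast; omega

lemma pv_A_eq (p q r : List (Int × Int)) : check_attack p q r = pvResult p q r := by
  unfold check_attack pvResult
  have hcong := PySem.List.foldl_congr_mem
      (l := PySem.List.pyRange 0 (r.length : Int) 1)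
      (f := fun (st : List Int × List Int) hi =>
        let h := PySem.List.pyGetD r hi (0, 0)
        if (PySem.List.slice r (some 0) (some hi) ++
            PySem.List.slice r (some (hi + 1)) none).contains h then
          ((PySem.List.pyRange 0 (p.length : Int) 1).foldl
            (fun acc pi => if h == PySem.List.pyGetD p pi (0, 0) then acc ++ [pi] else acc) st.1,
           st.2)
        else
          (st.1,
           (PySem.List.pyRange 0 (q.length : Int) 1).foldl
            (fun acc di => if h == PySem.List.pyGetD q di (0, 0) then acc ++ [di] else acc) st.2))
      (g := fun st hi => pvStep p q r st (PySem.List.pyGetD r hi (0, 0)))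
      (init := ([], []))
      ?_
  · rw [hcong, PySem.List.foldl_pyRange_zero_pyGetD' r (0,0) (pvStep p q r) ([],[])]
  · intro st hi hmem
    rw [PySem.List.mem_pyRange_one] at hmem
    obtain ⟨h0, hlt⟩ := hmem
    have hi_eq : hi = ((hi.toNat : Nat) : Int) := by omega
    have hiN : hi.toNat < r.length := by omega
    have hg : PySem.List.pyGetD r hi (0, 0) = r[hi.toNat] :=
      PySem.List.pyGetD_eq_getElem r (0,0) h0 (by exact_mod_cast hlt)
    simp only []
    rw [hi_eq]
    rw [PySem.List.slice_zero_start, PySem.List.slice_to_natCast]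
    rw [show ((hi.toNat : Int) + 1) = ((hi.toNat + 1 : Nat) : Int) by push_cast; ring,
        PySem.List.slice_from_natCast]
    rw [← hi_eq, hg, pv_mem_rest r hi.toNat hiN]
    rw [pv_innerA p _ st.1, pv_innerA q _ st.2]
    unfold pvStep
    simp only [decide_eq_true_eq]

lemma pv_B_eq (p q r : List (Int × Int)) : check_attack_alt p q r = pvResult p q r := by
  unfold check_attack_alt pvResult
  refine congrArg (fun res : List Int × List Int => [res.1, res.2])
    (PySem.List.foldl_congr_mem _ _ (pvStep p q r) _ ?_)
  intro st h _
  rw [PySem.Dict.getD_foldl_modify_add_one, PySem.Dict.getD_empty, zero_add,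
      pv_innerB p, pv_innerB q]
  rfl

-- ===== VERDICT (by name: the statement is the Claim_ definition above) =====
theorem check_attack_spec : Claim_equal_check_attack := by
  intro p q r _
  unfold Spec_check_attack
  rw [pv_A_eq, pv_B_eq]
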